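-- pv_equiv track=rewrite | github.com/donkz/rtcw-hello | hello.py | filter_name
-- ===== SOURCE A (Python) =====
-- def filter_name(name):
--     """Helper to remove Quake 3 color codes from player names."""
--     result = ""
--     i = 0
--     while i < len(name):
--         if name[i] == "^":
--             i += 2
--         else:
--             result += name[i]
--             i += 1
--     return result
-- ===== SOURCE B (Python) =====
-- def filter_name(name):
--     """Helper to remove Quake 3 color codes from player names."""
--     first, *rest = name.split("^")
--     pieces = [first]
--     pending = True  # a caret precedes the next segment and is an active code start
--     for p in rest:
--         if pending:
--             pieces.append(p[1:])     # drop the character consumed by the color code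
--             pending = p != ""        # empty segment: the code char WAS the next caret
--         else:
--             pieces.append(p)
--             pending = True
--     return "".join(pieces)
-- ===== Notes on version B (the rewrite author's own statement) =====
-- stated objective: faster
-- what changed: Replaces the index-by-index while loop, which grows the result by repeated string concatenation, with a single split on the caret character followed by a fold over the segments that slices off each consumed color character and joins the pieces once at the end.
import Mathlib
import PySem

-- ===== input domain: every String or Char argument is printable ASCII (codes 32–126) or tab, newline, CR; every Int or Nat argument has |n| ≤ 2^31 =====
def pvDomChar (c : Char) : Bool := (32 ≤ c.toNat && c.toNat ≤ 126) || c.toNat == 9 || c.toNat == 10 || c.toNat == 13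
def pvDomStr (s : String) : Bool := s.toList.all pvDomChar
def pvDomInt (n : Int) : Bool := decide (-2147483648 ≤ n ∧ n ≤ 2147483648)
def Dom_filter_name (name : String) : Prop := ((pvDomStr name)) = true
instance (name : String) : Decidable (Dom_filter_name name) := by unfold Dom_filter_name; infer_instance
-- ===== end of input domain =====

-- B replaces A's index-by-index while loop by split('^') plus a fold over the segments
-- that slices off each consumed color character; same values, different decomposition.

-- ===== PORT A =====
-- A's while loop: state (i, result); terminates since len - i decreases
def filterNameLoop (cs : List Char) (i : Nat) (result : List Char) : List Char :=
  if h : i < cs.length then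
    if cs[i] = '^' then
      filterNameLoop cs (i + 2) result
    else
      filterNameLoop cs (i + 1) (result ++ [cs[i]])
  else result
termination_by cs.length - i

def filter_name (name : String) : String :=
  String.ofList (filterNameLoop name.toList 0 [])

-- ===== PORT B =====
-- loop body of B's 'for p in rest': state (pieces, pending)
def filterNameAltStep (st : List (List Char) × Bool) (p : List Char) : List (List Char) × Bool :=
  if st.2 then (st.1 ++ [p.drop 1], p != [])
  else (st.1 ++ [p], true)

def filter_name_alt (name : String) : String :=
  let parts := PySem.Chars.splitOn name.toList ['^']
  -- 'first, *rest = name.split("^")': split always returns a nonempty list, so headD/tail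
  let first := parts.headD []
  let rest := parts.tail
  let r := rest.foldl filterNameAltStep ([first], true)
  String.ofList r.1.flatten

-- ===== PRECONDITION & SPEC =====
def Spec_filter_name (name : String) (out : String) : Prop := out = filter_name_alt name
instance (name : String) (out : String) : Decidable (Spec_filter_name name out) := by unfold Spec_filter_name; infer_instance

-- ===== CLAIM (what is proved, stated in full; the proofs are below) =====
def Claim_equal_filter_name : Prop := ∀ (name : String), Dom_filter_name name → Spec_filter_name name (filter_name name)

-- ===== LEMMAS AND PROOFS =====

-- reference function: the stripped characters, by structural recursion
def stripCodes : List Char → List Char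
  | [] => []
  | c :: rest => if c = '^' then stripCodes (rest.drop 1) else c :: stripCodes rest
termination_by l => l.length
decreasing_by all_goals simp

-- reference split on '^' (accumulator in normal order)
def splitC (cur : List Char) : List Char → List (List Char)
  | [] => [cur]
  | c :: rest => if c = '^' then cur :: splitC [] rest else splitC (cur ++ [c]) rest

-- B's fold, as a recursion over the segment list
def joinSegs : Bool → List (List Char) → List Char
  | _, [] => []
  | true, p :: rest => p.drop 1 ++ joinSegs (p != []) rest
  | false, p :: rest => p ++ joinSegs true rest

-- A's loop from index i appends exactly stripCodes of the remaining suffix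
theorem loop_eq_strip (cs : List Char) (i : Nat) (result : List Char) :
    filterNameLoop cs i result = result ++ stripCodes (cs.drop i) := by
  induction i, result using filterNameLoop.induct cs with
  | case1 i result h hc ih =>
      rw [filterNameLoop, dif_pos h, if_pos hc, ih,
        List.drop_eq_getElem_cons h, hc, stripCodes, if_pos rfl, List.drop_drop]
  | case2 i result h hc ih =>
      rw [filterNameLoop, dif_pos h, if_neg hc, ih,
        List.drop_eq_getElem_cons h, stripCodes, if_neg hc]
      simp
  | case3 i result h =>
      rw [filterNameLoop, dif_neg h, List.drop_eq_nil_of_le (by omega)]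
      simp [stripCodes]

-- PySem's split on "^" is splitC
theorem go_eq_splitC (fuel : Nat) (l cur : List Char) (accs : List (List Char))
    (h : l.length ≤ fuel) :
    PySem.Chars.splitOn.go ['^'] fuel l cur accs = accs.reverse ++ splitC cur.reverse l := by
  induction fuel generalizing l cur accs with
  | zero =>
      have : l = [] := List.eq_nil_of_length_eq_zero (by omega)
      subst this
      rw [PySem.Chars.splitOn.go]
      simp [splitC]
  | succ f ih =>
      cases l with
      | nil => rw [PySem.Chars.splitOn.go]; simp [splitC]; omega
      | cons c rest =>
          rw [PySem.Chars.splitOn.go]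
          by_cases hc : c = '^'
          · subst hc
            rw [if_pos (by simp [List.isPrefixOf])]
            rw [ih _ _ _ (by simp at h ⊢; omega)]
            simp [splitC]
          · rw [if_neg (by simp [List.isPrefixOf]; exact fun hh => hc hh.symm)]
            rw [ih _ _ _ (by simp at h ⊢; omega)]
            simp [splitC, hc]

theorem splitOn_eq_splitC (cs : List Char) :
    PySem.Chars.splitOn cs ['^'] = splitC [] cs := by
  rw [PySem.Chars.splitOn, go_eq_splitC _ _ _ _ (by omega)]
  simp

-- splitC with a nonempty accumulator only prepends to the head segment
theorem splitC_shift (l : List Char) (cur : List Char) :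
    splitC cur l = (cur ++ (splitC [] l).headD []) :: (splitC [] l).tail := by
  induction l generalizing cur with
  | nil => simp [splitC]
  | cons c rest ih =>
      by_cases hc : c = '^'
      · simp [splitC, hc]
      · rw [splitC, if_neg hc, ih (cur ++ [c])]
        conv_rhs => rw [splitC, if_neg hc]
        rw [List.nil_append, ih [c]]
        simp

theorem splitC_ne_nil (l : List Char) (cur : List Char) : splitC cur l ≠ [] := by
  induction l generalizing cur with
  | nil => simp [splitC]
  | cons c rest ih =>
      by_cases hc : c = '^' <;> simp [splitC, hc, ih]

-- B's foldl accumulates flattened pieces = joinSegs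
theorem foldl_step_eq_joinSegs (segs : List (List Char)) (pieces : List (List Char)) (b : Bool) :
    ((segs.foldl filterNameAltStep (pieces, b)).1).flatten = pieces.flatten ++ joinSegs b segs := by
  induction segs generalizing pieces b with
  | nil => simp [joinSegs]
  | cons p rest ih =>
      cases b with
      | true => rw [List.foldl_cons]; simp only [filterNameAltStep, if_pos]
                rw [ih, joinSegs]; simp
      | false => rw [List.foldl_cons]; simp only [filterNameAltStep]
                 rw [if_neg (by simp), ih, joinSegs]; simp

-- the split-and-join over the segments computes stripCodes
theorem joinSegs_splitC (l : List Char) :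
    joinSegs false (splitC [] l) = stripCodes l ∧
    joinSegs true (splitC [] l) = stripCodes (l.drop 1) := by
  induction l with
  | nil => simp [splitC, joinSegs, stripCodes]
  | cons c rest ih =>
      by_cases hc : c = '^'
      · subst hc
        constructor
        · rw [splitC, if_pos rfl, joinSegs, stripCodes, if_pos rfl]
          simpa using ih.2
        · rw [splitC, if_pos rfl, joinSegs]
          simpa using ih.1
      · have hsh := splitC_shift rest [c]
        obtain ⟨h0, t0, ht⟩ := List.exists_cons_of_ne_nil (splitC_ne_nil rest [])
        rw [ht] at hsh
        simp only [List.headD_cons, List.tail_cons, List.cons_append, List.nil_append] at hsh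
        constructor
        · rw [splitC, if_neg hc, List.nil_append, hsh, joinSegs, stripCodes, if_neg hc]
          have := ih.1
          rw [ht, joinSegs] at this
          simp [this]
        · rw [splitC, if_neg hc, List.nil_append, hsh, joinSegs]
          have := ih.1
          rw [ht, joinSegs] at this
          simpa using this

-- ===== VERDICT (by name: the statement is the Claim_ definition above) =====
theorem filter_name_spec : Claim_equal_filter_name := by
  intro name _
  unfold Spec_filter_name
  simp only [filter_name, filter_name_alt, splitOn_eq_splitC]
  obtain ⟨h0, t0, ht⟩ := List.exists_cons_of_ne_nil (splitC_ne_nil name.toList [])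
  rw [loop_eq_strip, ht]
  simp only [List.headD_cons, List.tail_cons]
  rw [foldl_step_eq_joinSegs]
  have hP := (joinSegs_splitC name.toList).1
  rw [ht, joinSegs] at hP
  simp [← hP]
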